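-- pv_equiv track=rewrite | github.com/ellismckenzielee/codewars-python | simple_fun_250_prefix_to_suffix.py | prefix_sums_to_suffix_sums
-- ===== SOURCE A (Python) =====
-- def prefix_sums_to_suffix_sums(prefix_sums):
--     initial = []
--     prev = 0
--     for  prefix in prefix_sums:
--         initial.append(prefix - prev)
--         prev = prefix
--     prev = sum(initial)
--     suffixes = [prev]
--     for num in initial[0:-1]:
--         suffixes.append(prev-num)
--         prev = prev-num
--     return suffixes
-- ===== SOURCE B (Python) =====
-- def prefix_sums_to_suffix_sums(prefix_sums):
--     if not prefix_sums:
--         return []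
--     total = prefix_sums[-1]
--     return [total] + [total - p for p in prefix_sums[:-1]]
-- ===== Notes on version B (the rewrite author's own statement) =====
-- stated objective: simpler
-- what changed: B reads the total as the last prefix sum and emits total - prefix_sums[i-1] directly in one comprehension, instead of A's two-pass reconstruct-the-original-then-iteratively-subtract with list appends and running state.
-- intended difference: On the empty list A returns [0] (an artefact of initialising suffixes with sum([])), while B returns [], the intended suffix-sums array of an empty input. — e.g. on prefix_sums_to_suffix_sums([]): A returns [0], B returns []
import Mathlib
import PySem

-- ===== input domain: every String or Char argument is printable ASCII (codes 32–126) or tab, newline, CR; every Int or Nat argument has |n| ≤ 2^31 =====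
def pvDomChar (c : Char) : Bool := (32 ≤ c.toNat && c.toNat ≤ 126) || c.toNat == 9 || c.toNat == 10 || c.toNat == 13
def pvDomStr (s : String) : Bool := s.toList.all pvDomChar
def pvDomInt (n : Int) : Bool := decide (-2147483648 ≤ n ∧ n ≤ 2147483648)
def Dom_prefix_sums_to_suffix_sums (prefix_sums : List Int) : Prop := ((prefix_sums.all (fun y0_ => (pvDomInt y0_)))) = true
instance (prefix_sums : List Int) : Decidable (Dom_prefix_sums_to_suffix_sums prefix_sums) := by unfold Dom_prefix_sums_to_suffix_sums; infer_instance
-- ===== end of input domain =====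

-- B builds the suffix array directly from the prefix sums (total = last prefix sum;
-- result[i] = total - prefix_sums[i-1]) instead of A's reconstruct-then-accumulate two-pass;
-- on the empty list B returns [] where A returns [0] (stated as an intended difference D_ below).

-- ===== PORT A =====
def prefix_sums_to_suffix_sums (prefix_sums : List Int) : List Int :=
  -- for prefix in prefix_sums: initial.append(prefix - prev); prev = prefix
  let st := prefix_sums.foldl
    (fun (st : List Int × Int) pfx => (st.1 ++ [pfx - st.2], pfx)) ([], 0)
  let initial := st.1
  -- prev = sum(initial); suffixes = [prev]
  let prev := initial.sum
  -- for num in initial[0:-1]: suffixes.append(prev - num); prev = prev - num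
  let st2 := (PySem.List.slice initial (some 0) (some (-1))).foldl
    (fun (st : List Int × Int) num => (st.1 ++ [st.2 - num], st.2 - num)) ([prev], prev)
  st2.1

-- ===== PORT B =====
def prefix_sums_to_suffix_sums_alt (prefix_sums : List Int) : List Int :=
  match prefix_sums with
  | [] => []                                           -- if not prefix_sums: return []
  | _ :: _ =>
    let total := PySem.List.pyGetD prefix_sums (-1) 0  -- prefix_sums[-1] (list is nonempty here)
    total :: (PySem.List.slice prefix_sums (some 0) (some (-1))).map (fun p => total - p)

-- ===== PRECONDITION & SPEC =====
-- On the empty list A returns [0] (an artefact of initialising suffixes = [sum([])]);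
-- B returns [], the intended suffix-sums of an empty list.
def D_prefix_sums_to_suffix_sums (prefix_sums : List Int) : Prop := prefix_sums = []
instance (prefix_sums : List Int) : Decidable (D_prefix_sums_to_suffix_sums prefix_sums) := by
  unfold D_prefix_sums_to_suffix_sums; infer_instance

def Spec_prefix_sums_to_suffix_sums (prefix_sums : List Int) (out : List Int) : Prop :=
  ¬ D_prefix_sums_to_suffix_sums prefix_sums → out = prefix_sums_to_suffix_sums_alt prefix_sums
instance (prefix_sums : List Int) (out : List Int) : Decidable (Spec_prefix_sums_to_suffix_sums prefix_sums out) := by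
  unfold Spec_prefix_sums_to_suffix_sums; infer_instance

def pvDiffWitness_prefix_sums_to_suffix_sums : List Int := []
def pvDiffWitnessOut_prefix_sums_to_suffix_sums : (List Int) × (List Int) := ([0], [])

-- ===== CLAIM (what is proved, stated in full; the proofs are below) =====
def Claim_unchanged_prefix_sums_to_suffix_sums : Prop := ∀ (prefix_sums : List Int), Dom_prefix_sums_to_suffix_sums prefix_sums → Spec_prefix_sums_to_suffix_sums prefix_sums (prefix_sums_to_suffix_sums prefix_sums)
def Claim_changed_prefix_sums_to_suffix_sums : Prop := Dom_prefix_sums_to_suffix_sums (pvDiffWitness_prefix_sums_to_suffix_sums) ∧ D_prefix_sums_to_suffix_sums (pvDiffWitness_prefix_sums_to_suffix_sums) ∧ prefix_sums_to_suffix_sums (pvDiffWitness_prefix_sums_to_suffix_sums) = pvDiffWitnessOut_prefix_sums_to_suffix_sums.1 ∧ prefix_sums_to_suffix_sums_alt (pvDiffWitness_prefix_sums_to_suffix_sums) = pvDiffWitnessOut_prefix_sums_to_suffix_sums.2 ∧ pvDiffWitnessOut_prefix_sums_to_suffix_sums.1 ≠ pvDiffWitnessOut_prefix_sums_to_suffi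x_sums.2
def Claim_exact_prefix_sums_to_suffix_sums : Prop := ∀ (prefix_sums : List Int), Dom_prefix_sums_to_suffix_sums prefix_sums → D_prefix_sums_to_suffix_sums prefix_sums → prefix_sums_to_suffix_sums prefix_sums ≠ prefix_sums_to_suffix_sums_alt prefix_sums

-- ===== LEMMAS AND PROOFS =====

-- the list A's first loop builds: successive differences of ps starting from prev
def pvDiffs (prev : Int) : List Int → List Int
  | [] => []
  | p :: t => (p - prev) :: pvDiffs p t

-- the final value of A's first-loop accumulator 'prev'
def pvLast (prev : Int) : List Int → Int
  | [] => prev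
  | p :: t => pvLast p t

-- the list A's second loop appends: running differences from c
def pvSufl (c : Int) : List Int → List Int
  | [] => []
  | n :: t => (c - n) :: pvSufl (c - n) t

theorem pvFoldA (ps : List Int) : ∀ (acc : List Int) (prev : Int),
    ps.foldl (fun (st : List Int × Int) pfx => (st.1 ++ [pfx - st.2], pfx)) (acc, prev)
      = (acc ++ pvDiffs prev ps, pvLast prev ps) := by
  induction ps with
  | nil => intro acc prev; simp [pvDiffs, pvLast]
  | cons p t ih => intro acc prev; simp [pvDiffs, pvLast, ih]

theorem pvFoldB (ns : List Int) : ∀ (acc : List Int) (c : Int),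
    ns.foldl (fun (st : List Int × Int) n => (st.1 ++ [st.2 - n], st.2 - n)) (acc, c)
      = (acc ++ pvSufl c ns, c - ns.sum) := by
  induction ns with
  | nil => intro acc c; simp [pvSufl]
  | cons n t ih =>
    intro acc c
    simp only [List.foldl_cons, ih, pvSufl, List.sum_cons, Prod.mk.injEq]
    refine ⟨by simp, by omega⟩

theorem pvSumDiffs (ps : List Int) : ∀ prev, (pvDiffs prev ps).sum = pvLast prev ps - prev := by
  induction ps with
  | nil => intro prev; simp [pvDiffs, pvLast]
  | cons p t ih => intro prev; simp only [pvDiffs, pvLast, List.sum_cons, ih p]; omega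

theorem pvSuflDiffs (qs : List Int) : ∀ c prev,
    pvSufl c (pvDiffs prev qs) = qs.map (fun q => c + prev - q) := by
  induction qs with
  | nil => intro c prev; simp [pvDiffs, pvSufl]
  | cons q t ih =>
    intro c prev
    simp only [pvDiffs, pvSufl, List.map_cons, ih, List.cons.injEq]
    refine ⟨by ring, ?_⟩
    apply List.map_congr_left; intro a _; ring

theorem pvDropLastDiffs (ps : List Int) : ∀ prev,
    (pvDiffs prev ps).dropLast = pvDiffs prev ps.dropLast := by
  induction ps with
  | nil => intro prev; simp [pvDiffs]
  | cons p t ih =>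
    intro prev
    cases t with
    | nil => simp [pvDiffs]
    | cons q u =>
      simp only [pvDiffs, List.dropLast_cons₂, List.cons.injEq]
      exact ⟨trivial, ih p⟩

theorem pvLastElem (t : List Int) : ∀ (prev p : Int),
    pvLast prev (p :: t) = (p :: t)[t.length]'(by simp) := by
  induction t with
  | nil => intro prev p; rfl
  | cons q u ih => intro prev p; exact ih p q

theorem pvGetNegOne (p : Int) (t : List Int) :
    PySem.List.pyGetD (p :: t) (-1) 0 = pvLast 0 (p :: t) := by
  rw [pvLastElem]
  simp only [pysem, Int.reduceNeg, List.length_cons, Order.lt_one_iff,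
    le_add_iff_nonneg_left, zero_le, PySem.List.pyGetD_neg_ofNat, add_tsub_cancel_right]
  rfl

-- ===== VERDICT (by name: the statement is the Claim_ definition above) =====
theorem prefix_sums_to_suffix_sums_spec : Claim_unchanged_prefix_sums_to_suffix_sums := by
  intro ps _ hD
  unfold D_prefix_sums_to_suffix_sums at hD
  match ps, hD with
  | p :: t, _ =>
    show prefix_sums_to_suffix_sums (p :: t) = prefix_sums_to_suffix_sums_alt (p :: t)
    unfold prefix_sums_to_suffix_sums prefix_sums_to_suffix_sums_alt
    simp only [pvFoldA, List.nil_append, PySem.List.slice_zero_start,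
      PySem.List.slice_to_neg_one, pvDropLastDiffs, pvFoldB, pvSumDiffs,
      pvGetNegOne, pvSuflDiffs, List.cons_append, List.nil_append]
    simp

theorem prefix_sums_to_suffix_sums_changed : Claim_changed_prefix_sums_to_suffix_sums := by
  unfold Claim_changed_prefix_sums_to_suffix_sums; decide

theorem prefix_sums_to_suffix_sums_tight : Claim_exact_prefix_sums_to_suffix_sums := by
  intro ps _ hD
  unfold D_prefix_sums_to_suffix_sums at hD
  subst hD
  decide
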